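-- pv_equiv track=rewrite | github.com/Littl3-Groot/Bee-Bot-py | cogs/fonctions.py | decversbin
-- ===== SOURCE A (Python) =====
-- def decversbin(valeurdecimal):
--     """Traduit une valeur decimal en une valeur binaire """
--     valeurbinaire = 0
--     ord = 0
--     while valeurdecimal != 0:
--         reste = valeurdecimal % 2
--         p = 10 ** ord
--         valeurbinaire = valeurbinaire + reste * p
--         ord = ord + 1
--         valeurdecimal = valeurdecimal // 2
--     return valeurbinaire
-- ===== SOURCE B (Python) =====
-- def decversbin(valeurdecimal):
--     """Traduit une valeur decimal en une valeur binaire """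
--     return int(bin(valeurdecimal)[2:])
-- ===== Notes on version B (the rewrite author's own statement) =====
-- stated objective: idiomatic
-- what changed: Replaced the hand-written while loop maintaining an accumulator and a power-of-ten counter by the standard-library route: format the number in binary with bin() and reparse the digit string as a base-10 integer.
-- outside the precondition, e.g. on decversbin(-1): A does not finish within the time limit, B raises ValueError
import Mathlib
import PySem

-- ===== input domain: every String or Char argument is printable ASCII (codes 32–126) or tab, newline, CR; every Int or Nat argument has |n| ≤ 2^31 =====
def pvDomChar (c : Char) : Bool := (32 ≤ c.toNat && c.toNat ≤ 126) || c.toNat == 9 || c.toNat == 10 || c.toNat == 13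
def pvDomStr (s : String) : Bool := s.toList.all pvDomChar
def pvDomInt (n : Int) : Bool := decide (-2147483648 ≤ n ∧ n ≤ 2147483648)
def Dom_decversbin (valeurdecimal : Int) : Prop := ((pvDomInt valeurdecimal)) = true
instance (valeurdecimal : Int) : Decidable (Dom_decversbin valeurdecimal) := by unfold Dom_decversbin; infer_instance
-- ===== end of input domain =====

-- B replaces A's accumulator/power-of-ten while loop by bin() + int(): equivalence of the return values on nonnegative inputs.

-- ===== PORT A =====
-- A's while loop, transliterated with a fuel guard for totality (the loop
-- runs at most toNat+1 times on inputs admitted by Pre_; on negatives A diverges).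
def decversbinLoop (fuel : Nat) (valeurdecimal valeurbinaire : Int) (ord : Nat) : Int :=
  match fuel with
  | 0 => valeurbinaire
  | f + 1 =>
    if valeurdecimal ≠ 0 then
      decversbinLoop f (PySem.Int.floordiv valeurdecimal 2)
        (valeurbinaire + (PySem.Int.mod valeurdecimal 2) * 10 ^ ord) (ord + 1)
    else valeurbinaire

def decversbin (valeurdecimal : Int) : Int :=
  decversbinLoop (valeurdecimal.toNat + 1) valeurdecimal 0 0

-- ===== PORT B =====
-- B's bin(): the binary digit string, ported as Nat.digits 2 (LSB first, so bin's
-- MSB-first digit string is its reverse); B's int(): the standard left-to-right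
-- base-10 parse of that digit string, a foldl with acc*10+d.
def decversbin_alt (valeurdecimal : Int) : Int :=
  (Nat.digits 2 valeurdecimal.toNat).reverse.foldl (fun (acc : Int) (d : Nat) => acc * 10 + (d : Int)) 0

-- ===== PRECONDITION & SPEC =====
-- Pre_ excludes negative inputs: there A's while loop never terminates (valeurdecimal
-- stays at -1 forever) so A returns no value, and B raises ValueError.
def Pre_decversbin (valeurdecimal : Int) : Prop := 0 ≤ valeurdecimal
instance (valeurdecimal : Int) : Decidable (Pre_decversbin valeurdecimal) := by unfold Pre_decversbin; infer_instance
def pvWitness_decversbin : Int := (5)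
def Spec_decversbin (valeurdecimal : Int) (out : Int) : Prop := out = decversbin_alt valeurdecimal
instance (valeurdecimal : Int) (out : Int) : Decidable (Spec_decversbin valeurdecimal out) := by unfold Spec_decversbin; infer_instance

-- ===== CLAIM (what is proved, stated in full; the proofs are below) =====
def Claim_equal_decversbin : Prop := ∀ (valeurdecimal : Int), Dom_decversbin valeurdecimal → Pre_decversbin valeurdecimal → Spec_decversbin valeurdecimal (decversbin valeurdecimal)

-- ===== LEMMAS AND PROOFS =====

-- Nat.ofDigits_cons at an Int base (the Mathlib lemma is Nat-only).
lemma ofDigits_cons_int (hd : Nat) (tl : List Nat) :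
    Nat.ofDigits (10 : Int) (hd :: tl) = (hd : Int) + 10 * Nat.ofDigits 10 tl := rfl

-- the base-10 parse foldl over the reversed (MSB-first) digits is Nat.ofDigits 10.
lemma parse_eq (L : List Nat) :
    L.reverse.foldl (fun (acc : Int) (d : Nat) => acc * 10 + (d : Int)) 0
      = (Nat.ofDigits 10 L : Int) := by
  rw [List.foldl_reverse]
  induction L with
  | nil => simp [Nat.ofDigits]
  | cons d L ih =>
    rw [List.foldr_cons, ih, ofDigits_cons_int]
    ring

-- B's value is Nat.ofDigits 10 of the LSB-first binary digits.
lemma alt_eq_ofDigits (v : Int) :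
    decversbin_alt v = (Nat.ofDigits 10 (Nat.digits 2 v.toNat) : Int) :=
  parse_eq _

lemma fdiv2_step (v : Int) (hv : 0 ≤ v) (hne : v ≠ 0) :
    0 ≤ PySem.Int.floordiv v 2 ∧ (PySem.Int.floordiv v 2).toNat < v.toNat := by
  rw [PySem.Int.floordiv_eq_ediv_of_pos (by omega)]
  omega

-- A's loop computes vb + 10^ord * ofDigits 10 (digits 2 v).
lemma loop_eq : ∀ (f : Nat) (v vb : Int) (ord : Nat), 0 ≤ v → v.toNat < f →
    decversbinLoop f v vb ord = vb + 10 ^ ord * (Nat.ofDigits 10 (Nat.digits 2 v.toNat) : Int) := by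
  intro f
  induction f with
  | zero => intro v vb ord hv hf; omega
  | succ g ih =>
    intro v vb ord hv hf
    by_cases h0 : v = 0
    · subst h0; simp [decversbinLoop, Nat.ofDigits]
    · have hs := fdiv2_step v hv h0
      simp only [decversbinLoop, h0, ne_eq, not_false_eq_true, if_pos]
      rw [ih _ _ _ hs.1 (by omega)]
      have hdig : Nat.digits 2 v.toNat
          = v.toNat % 2 :: Nat.digits 2 (v.toNat / 2) := by
        exact Nat.digits_def' (by norm_num) (by omega)
      have hq : (PySem.Int.floordiv v 2).toNat = v.toNat / 2 := by
        rw [PySem.Int.floordiv_eq_ediv_of_pos (by omega)]; omega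
      have hm : PySem.Int.mod v 2 = ((v.toNat % 2 : Nat) : Int) := by
        rw [PySem.Int.mod_eq_emod_of_pos (by omega)]; omega
      rw [hdig, hq, hm, ofDigits_cons_int]
      ring

-- ===== VERDICT (by name: the statement is the Claim_ definition above) =====
theorem decversbin_spec : Claim_equal_decversbin := by
  intro v _ hpre
  unfold Spec_decversbin decversbin
  rw [loop_eq (v.toNat + 1) v 0 0 hpre (by omega), alt_eq_ofDigits]
  ring
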